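-- pv_equiv track=rewrite | github.com/Wal33D/nhtsa-vin-decoder | data/process_wmi.py | generate_java_code
-- ===== SOURCE A (Python) =====
-- from collections import defaultdict
--
-- def generate_java_code(wmi_dict):
--     """Generate Java code for WMIDatabase"""
--
--     # Sort by WMI code for organized output
--     sorted_wmis = sorted(wmi_dict.items())
--
--     # Group by first character for better organization
--     grouped = defaultdict(list)
--     for wmi, manufacturer in sorted_wmis:
--         grouped[wmi[0]].append((wmi, manufacturer))
--
--     java_code = []
--     java_code.append("        // ===== COMPREHENSIVE WMI DATABASE =====")
--     java_code.append("        // Generated from WALL-E/vin-decoder repository")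
--     java_code.append(f"        // Total WMI codes: {len(wmi_dict)}")
--     java_code.append("")
--
--     # Generate code by region/first character
--     region_names = {
--         '1': 'United States',
--         '2': 'Canada',
--         '3': 'Mexico',
--         '4': 'United States',
--         '5': 'United States',
--         '6': 'Australia/Oceania',
--         '7': 'New Zealand/Oceania',
--         '8': 'Argentina/South America',
--         '9': 'Brazil/South America',
--         'A': 'South Africa',
--         'B': 'Angola/Africa',
--         'C': 'Benin/Africa',
--         'D': 'Egypt/Africa',
--         'E': 'Ethiopia/Africa',
--         'F': 'Ghana/Africa',
--         'G': 'Morocco/Africa',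
--         'H': 'Ghana/Africa',
--         'J': 'Japan',
--         'K': 'Korea',
--         'L': 'China',
--         'M': 'India/Asia',
--         'N': 'Iran/Turkey',
--         'P': 'Malaysia/Philippines',
--         'R': 'Taiwan/UAE',
--         'S': 'United Kingdom/Europe',
--         'T': 'Switzerland/Europe',
--         'U': 'Hungary/Europe',
--         'V': 'Austria/Europe',
--         'W': 'Germany',
--         'X': 'Russia/USSR',
--         'Y': 'Belgium/Europe',
--         'Z': 'Italy/Europe'
--     }
--
--     for char in sorted(grouped.keys()):
--         region = region_names.get(char, 'Unknown')
--         java_code.append(f"        // ---- {char}: {region} ----")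
--
--         for wmi, manufacturer in grouped[char]:
--             # Escape quotes in manufacturer name
--             manufacturer = manufacturer.replace('"', '\\"')
--             java_code.append(f'        WMI_MAP.put("{wmi}", "{manufacturer}");')
--
--         java_code.append("")
--
--     return '\n'.join(java_code)
-- ===== SOURCE B (Python) =====
-- REGIONS = [
--     ("United States", "145"), ("Canada", "2"), ("Mexico", "3"),
--     ("Australia/Oceania", "6"), ("New Zealand/Oceania", "7"),
--     ("Argentina/South America", "8"), ("Brazil/South America", "9"),
--     ("South Africa", "A"), ("Angola/Africa", "B"), ("Benin/Africa", "C"),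
--     ("Egypt/Africa", "D"), ("Ethiopia/Africa", "E"), ("Ghana/Africa", "FH"),
--     ("Morocco/Africa", "G"), ("Japan", "J"), ("Korea", "K"), ("China", "L"),
--     ("India/Asia", "M"), ("Iran/Turkey", "N"), ("Malaysia/Philippines", "P"),
--     ("Taiwan/UAE", "R"), ("United Kingdom/Europe", "S"), ("Switzerland/Europe", "T"),
--     ("Hungary/Europe", "U"), ("Austria/Europe", "V"), ("Germany", "W"),
--     ("Russia/USSR", "X"), ("Belgium/Europe", "Y"), ("Italy/Europe", "Z"),
-- ]
--
--
-- def _region(c):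
--     """Region of a leading WMI character, from an inverted (region -> chars) table."""
--     for name, chars in REGIONS:
--         if c in chars:
--             return name
--     return 'Unknown'
--
--
-- def _emit(items):
--     """Recursively emit one leading-character group of the sorted items, then the rest."""
--     if not items:
--         return []
--     c = items[0][0][0]
--     k = 1
--     while k < len(items) and items[k][0][0] == c:
--         k += 1
--     lines = [f"        // ---- {c}: {_region(c)} ----"]
--     for wmi, manufacturer in items[:k]:
--         lines.append('        WMI_MAP.put("%s", "%s");' % (wmi, manufacturer.replace('"', '\\"')))
--     lines.append("")
--     return lines + _emit(items[k:])
--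
--
-- def generate_java_code(wmi_dict):
--     """Generate Java code for WMIDatabase (recursive group-by-group emission)."""
--     head = [
--         "        // ===== COMPREHENSIVE WMI DATABASE =====",
--         "        // Generated from WALL-E/vin-decoder repository",
--         f"        // Total WMI codes: {len(wmi_dict)}",
--         "",
--     ]
--     return '\n'.join(head + _emit(sorted(wmi_dict.items())))
-- ===== Notes on version B (the rewrite author's own statement) =====
-- stated objective: alternative
-- what changed: B drops A's defaultdict grouping and second sort over group keys: it recursively emits one leading-character block at a time from the once-sorted items, and looks regions up in an inverted region->characters table scanned linearly instead of A's char-keyed dict.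
-- outside the precondition, e.g. on generate_java_code({'': 'NoName'}): A raises IndexError, B raises IndexError
import Mathlib
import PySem

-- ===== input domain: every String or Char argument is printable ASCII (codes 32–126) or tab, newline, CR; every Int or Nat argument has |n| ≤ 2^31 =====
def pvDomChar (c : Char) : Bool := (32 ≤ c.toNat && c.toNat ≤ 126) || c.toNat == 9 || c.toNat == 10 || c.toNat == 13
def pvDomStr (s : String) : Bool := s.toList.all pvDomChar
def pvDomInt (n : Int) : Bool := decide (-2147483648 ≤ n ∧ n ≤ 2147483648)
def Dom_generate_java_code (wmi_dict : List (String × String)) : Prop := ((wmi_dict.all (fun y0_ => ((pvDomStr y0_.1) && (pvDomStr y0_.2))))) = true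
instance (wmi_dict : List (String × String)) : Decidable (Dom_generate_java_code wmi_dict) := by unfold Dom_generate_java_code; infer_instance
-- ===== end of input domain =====

-- B replaces A's defaultdict grouping plus second sort over the group keys by a recursive
-- emitter that peels one leading-character block at a time off the once-sorted items, and
-- replaces A's char-keyed region dict by a linear scan of an inverted region -> characters
-- table (objective: alternative decomposition; equal return value on Pre_).

-- ===== PORT A =====

-- region_names dict of A (string keys are single characters; wmi[0] is a Char in this port)
def pvRegionNamesA : PySem.Dict Char String := PySem.Dict.ofList
  [('1', "United States"), ('2', "Canada"), ('3', "Mexico"), ('4', "United States"),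
   ('5', "United States"), ('6', "Australia/Oceania"), ('7', "New Zealand/Oceania"),
   ('8', "Argentina/South America"), ('9', "Brazil/South America"), ('A', "South Africa"),
   ('B', "Angola/Africa"), ('C', "Benin/Africa"), ('D', "Egypt/Africa"), ('E', "Ethiopia/Africa"),
   ('F', "Ghana/Africa"), ('G', "Morocco/Africa"), ('H', "Ghana/Africa"), ('J', "Japan"),
   ('K', "Korea"), ('L', "China"), ('M', "India/Asia"), ('N', "Iran/Turkey"),
   ('P', "Malaysia/Philippines"), ('R', "Taiwan/UAE"), ('S', "United Kingdom/Europe"),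
   ('T', "Switzerland/Europe"), ('U', "Hungary/Europe"), ('V', "Austria/Europe"),
   ('W', "Germany"), ('X', "Russia/USSR"), ('Y', "Belgium/Europe"), ('Z', "Italy/Europe")]

-- wmi[0]; the '.getD' default is never reached on Pre_ (Python raises IndexError on "")
def pvHeadA (w : String) : Char := (PySem.Str.pyGet? w 0).getD ' '

def generate_java_code (wmi_dict : List (String × String)) : String :=
  -- sorted(wmi_dict.items())
  let sorted_wmis := PySem.List.sorted2 wmi_dict (fun p => p.1) (fun p => p.2)
  -- grouped = defaultdict(list); grouped[wmi[0]].append((wmi, manufacturer))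
  let grouped := sorted_wmis.foldl
    (fun d p => d.modify (pvHeadA p.1) [] (fun l => l ++ [p])) PySem.Dict.empty
  let java_code : List String :=
    ["        // ===== COMPREHENSIVE WMI DATABASE =====",
     "        // Generated from WALL-E/vin-decoder repository",
     "        // Total WMI codes: " ++ PySem.Int.toStr (wmi_dict.length : Int),
     ""]
  -- for char in sorted(grouped.keys()): … (grouped[char] read as getD: char is always a key)
  let java_code := (PySem.List.sorted grouped.keys (fun c => c)).foldl
    (fun acc c =>
      let region := pvRegionNamesA.getD c "Unknown"
      let acc := acc ++ ["        // ---- " ++ String.singleton c ++ ": " ++ region ++ " ----"]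
      let acc := (grouped.getD c []).foldl
        (fun acc2 p =>
          acc2 ++ ["        WMI_MAP.put(\"" ++ p.1 ++ "\", \""
                    ++ PySem.Str.replace p.2 "\"" "\\\"" ++ "\");"]) acc
      acc ++ [""]) java_code
  PySem.Str.join "\n" java_code

-- ===== PORT B =====

-- B's inverted table: region name -> the leading characters that map to it
def pvRegionsB : List (String × String) :=
  [("United States", "145"), ("Canada", "2"), ("Mexico", "3"),
   ("Australia/Oceania", "6"), ("New Zealand/Oceania", "7"),
   ("Argentina/South America", "8"), ("Brazil/South America", "9"),
   ("South Africa", "A"), ("Angola/Africa", "B"), ("Benin/Africa", "C"),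
   ("Egypt/Africa", "D"), ("Ethiopia/Africa", "E"), ("Ghana/Africa", "FH"),
   ("Morocco/Africa", "G"), ("Japan", "J"), ("Korea", "K"), ("China", "L"),
   ("India/Asia", "M"), ("Iran/Turkey", "N"), ("Malaysia/Philippines", "P"),
   ("Taiwan/UAE", "R"), ("United Kingdom/Europe", "S"), ("Switzerland/Europe", "T"),
   ("Hungary/Europe", "U"), ("Austria/Europe", "V"), ("Germany", "W"),
   ("Russia/USSR", "X"), ("Belgium/Europe", "Y"), ("Italy/Europe", "Z")]

-- first table row whose character set contains c ('c in chars' with a single-character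
-- c is character membership — exact)
def pvRegionOfB (c : Char) : String :=
  match pvRegionsB.find? (fun r => r.2.toList.contains c) with
  | some r => r.1
  | none => "Unknown"

-- wmi[0]; the '.getD' default is never reached on Pre_ (Python raises IndexError on "")
def pvHeadB (w : String) : Char := (PySem.Str.pyGet? w 0).getD ' '

-- f"        // ---- {c}: {_region(c)} ----"
def pvHeaderB (c : Char) : String :=
  "        // ---- " ++ String.singleton c ++ ": " ++ pvRegionOfB c ++ " ----"

-- '        WMI_MAP.put("%s", "%s");' % (wmi, manufacturer.replace('"', '\\"'))
def pvPutB (p : String × String) : String :=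
  "        WMI_MAP.put(\"" ++ p.1 ++ "\", \"" ++ PySem.Str.replace p.2 "\"" "\\\"" ++ "\");"

-- _emit: items[:k] is the first item plus the longest same-leading-character prefix of the
-- tail (the while loop), items[k:] the remainder
def pvEmitB : List (String × String) → List String
  | [] => []
  | p :: t =>
      (pvHeaderB (pvHeadB p.1)
        :: ((p :: t.takeWhile (fun q => pvHeadB q.1 == pvHeadB p.1)).map pvPutB ++ [""]))
        ++ pvEmitB (t.dropWhile (fun q => pvHeadB q.1 == pvHeadB p.1))
  termination_by s => s.length
  decreasing_by
    simp only [List.length_cons]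
    exact Nat.lt_succ_of_le (List.length_dropWhile_le _ _)

def generate_java_code_alt (wmi_dict : List (String × String)) : String :=
  let head : List String :=
    ["        // ===== COMPREHENSIVE WMI DATABASE =====",
     "        // Generated from WALL-E/vin-decoder repository",
     "        // Total WMI codes: " ++ PySem.Int.toStr (wmi_dict.length : Int),
     ""]
  PySem.Str.join "\n"
    (head ++ pvEmitB (PySem.List.sorted2 wmi_dict (fun p => p.1) (fun p => p.2)))

-- ===== PRECONDITION & SPEC =====

-- Pre_ excludes empty WMI codes, on which A raises IndexError (wmi[0]); B raises there too.
def Pre_generate_java_code (wmi_dict : List (String × String)) : Prop :=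
  ∀ p ∈ wmi_dict, p.1 ≠ ""

instance (wmi_dict : List (String × String)) : Decidable (Pre_generate_java_code wmi_dict) := by
  unfold Pre_generate_java_code; infer_instance

def pvWitness_generate_java_code : (List (String × String)) :=
  [("1FA", "Ford \"US\""), ("JHM", "Honda"), ("1G1", "Chevrolet")]

def Spec_generate_java_code (wmi_dict : List (String × String)) (out : String) : Prop :=
  out = generate_java_code_alt wmi_dict
instance (wmi_dict : List (String × String)) (out : String) :
    Decidable (Spec_generate_java_code wmi_dict out) := by
  unfold Spec_generate_java_code; infer_instance

-- ===== CLAIM (what is proved, stated in full; the proofs are below) =====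
def Claim_equal_generate_java_code : Prop :=
  ∀ (wmi_dict : List (String × String)), Dom_generate_java_code wmi_dict →
    Pre_generate_java_code wmi_dict →
    Spec_generate_java_code wmi_dict (generate_java_code wmi_dict)

-- ===== LEMMAS AND PROOFS =====

theorem pvHead_eq : pvHeadA = pvHeadB := rfl

-- A's header line for a group, as A's outer loop builds it (proof-only helper)
def pvHeaderA (c : Char) : String :=
  "        // ---- " ++ String.singleton c ++ ": " ++ pvRegionNamesA.getD c "Unknown" ++ " ----"

-- A's region dict, evaluated to its literal items (used to run the lookup symbolically)
theorem pvRegionNamesA_mk : pvRegionNamesA = PySem.Dict.mk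
    [('1', "United States"), ('2', "Canada"), ('3', "Mexico"), ('4', "United States"),
     ('5', "United States"), ('6', "Australia/Oceania"), ('7', "New Zealand/Oceania"),
     ('8', "Argentina/South America"), ('9', "Brazil/South America"), ('A', "South Africa"),
     ('B', "Angola/Africa"), ('C', "Benin/Africa"), ('D', "Egypt/Africa"), ('E', "Ethiopia/Africa"),
     ('F', "Ghana/Africa"), ('G', "Morocco/Africa"), ('H', "Ghana/Africa"), ('J', "Japan"),
     ('K', "Korea"), ('L', "China"), ('M', "India/Asia"), ('N', "Iran/Turkey"),
     ('P', "Malaysia/Philippines"), ('R', "Taiwan/UAE"), ('S', "United Kingdom/Europe"),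
     ('T', "Switzerland/Europe"), ('U', "Hungary/Europe"), ('V', "Austria/Europe"),
     ('W', "Germany"), ('X', "Russia/USSR"), ('Y', "Belgium/Europe"), ('Z', "Italy/Europe")] := rfl

-- the two region lookups agree on every character
theorem pvRegion_eq (c : Char) :
    pvRegionOfB c = pvRegionNamesA.getD c "Unknown" := by
  rw [pvRegionNamesA_mk]
  by_cases hc : c ∈ ['1','2','3','4','5','6','7','8','9','A','B','C','D','E','F','G','H',
      'J','K','L','M','N','P','R','S','T','U','V','W','X','Y','Z']
  · simp only [List.mem_cons, List.not_mem_nil, or_false] at hc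
    rcases hc with rfl|rfl|rfl|rfl|rfl|rfl|rfl|rfl|rfl|rfl|rfl|rfl|rfl|rfl|rfl|rfl|rfl|rfl|rfl|rfl|rfl|rfl|rfl|rfl|rfl|rfl|rfl|rfl|rfl|rfl|rfl|rfl <;> rfl
  · simp only [List.mem_cons, not_or, List.not_mem_nil] at hc
    obtain ⟨h1,h2,h3,h4,h5,h6,h7,h8,h9,hA,hB,hC,hD,hE,hF,hG,hH,hJ,hK,hL,hM,hN,hP,hR,hS,hT,hU,hV,hW,hX,hY,hZ,-⟩ := hc
    have hleft : pvRegionOfB c = "Unknown" := by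
      simp [pvRegionOfB, pvRegionsB, List.find?, h1,h2,h3,h4,h5,h6,h7,h8,h9,hA,hB,hC,hD,hE,hF,hG,hH,hJ,hK,hL,hM,hN,hP,hR,hS,hT,hU,hV,hW,hX,hY,hZ]
    have hright : (PySem.Dict.mk
      [('1', "United States"), ('2', "Canada"), ('3', "Mexico"), ('4', "United States"),
       ('5', "United States"), ('6', "Australia/Oceania"), ('7', "New Zealand/Oceania"),
       ('8', "Argentina/South America"), ('9', "Brazil/South America"), ('A', "South Africa"),
       ('B', "Angola/Africa"), ('C', "Benin/Africa"), ('D', "Egypt/Africa"), ('E', "Ethiopia/Africa"),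
       ('F', "Ghana/Africa"), ('G', "Morocco/Africa"), ('H', "Ghana/Africa"), ('J', "Japan"),
       ('K', "Korea"), ('L', "China"), ('M', "India/Asia"), ('N', "Iran/Turkey"),
       ('P', "Malaysia/Philippines"), ('R', "Taiwan/UAE"), ('S', "United Kingdom/Europe"),
       ('T', "Switzerland/Europe"), ('U', "Hungary/Europe"), ('V', "Austria/Europe"),
       ('W', "Germany"), ('X', "Russia/USSR"), ('Y', "Belgium/Europe"), ('Z', "Italy/Europe")]).getD
        c "Unknown" = "Unknown" := by
      simp [PySem.Dict.getD, PySem.Dict.get?, Ne.symm h1, Ne.symm h2, Ne.symm h3, Ne.symm h4, Ne.symm h5, Ne.symm h6, Ne.symm h7, Ne.symm h8, Ne.symm h9, Ne.symm hA, Ne.symm hB, Ne.symm hC, Ne.symm hD, Ne.symm hE, Ne.symm hF, Ne.symm hG, Ne.symm hH, Ne.symm hJ, Ne.symm hK, Ne.symm hL, Ne.symm hM, Ne.symm hN, Ne.symm hP, Ne.symm hR, Ne.symm hS, Ne.symm hT, Ne.symm hU, Ne.symm hV, Ne.symm hW, Ne.symm hX, Ne.symm hY, Ne.symm hZ]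
    rw [hleft, hright]

theorem pvHeader_eq (c : Char) : pvHeaderA c = pvHeaderB c := by
  unfold pvHeaderA pvHeaderB
  rw [pvRegion_eq]

theorem pvHeadB_eq_head (s : String) (x : Char) (xs : List Char) (h : s.toList = x :: xs) :
    pvHeadB s = x := by
  simp [pvHeadB, PySem.Str.pyGet?, PySem.Chars.pyGet?, PySem.List.pyGet?, PySem.List.pyIdx?, h]

-- head-character order from string order
theorem pvHead_le_of_le (a b : String) (ha : a ≠ "") (hb : b ≠ "") (h : a ≤ b) :
    pvHeadB a ≤ pvHeadB b := by
  have ha' : a.toList ≠ [] := by simpa [← String.toList_eq_nil_iff] using ha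
  have hb' : b.toList ≠ [] := by simpa [← String.toList_eq_nil_iff] using hb
  obtain ⟨x, xs, hax⟩ := List.exists_cons_of_ne_nil ha'
  obtain ⟨y, ys, hby⟩ := List.exists_cons_of_ne_nil hb'
  rw [pvHeadB_eq_head a x xs hax, pvHeadB_eq_head b y ys hby]
  have hnl : ¬ b < a := not_lt.mpr h
  rw [String.lt_iff_toList_lt, hax, hby] at hnl
  by_contra hxy
  exact hnl (List.Lex.rel (not_le.mp hxy))

-- insertion with the (fst, snd) lexicographic test keeps fst nondecreasing
theorem pvInsertBy_pairwise (x : String × String) (ys : List (String × String))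
    (h : ys.Pairwise (fun a b => a.1 ≤ b.1)) :
    (PySem.List.insertBy
      (fun a b : String × String =>
        decide (a.1 < b.1) || (!decide (b.1 < a.1) && decide (a.2 < b.2))) x ys).Pairwise
      (fun a b => a.1 ≤ b.1) := by
  induction ys with
  | nil => simp [PySem.List.insertBy]
  | cons y ys ih =>
    rw [show PySem.List.insertBy
        (fun a b : String × String =>
          decide (a.1 < b.1) || (!decide (b.1 < a.1) && decide (a.2 < b.2))) x (y :: ys)
      = if (decide (x.1 < y.1) || (!decide (y.1 < x.1) && decide (x.2 < y.2))) = true then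
          x :: y :: ys
        else y :: PySem.List.insertBy
          (fun a b : String × String =>
            decide (a.1 < b.1) || (!decide (b.1 < a.1) && decide (a.2 < b.2))) x ys from rfl]
    obtain ⟨hy, hys⟩ := List.pairwise_cons.mp h
    split_ifs with hb
    · simp only [Bool.or_eq_true, Bool.and_eq_true, Bool.not_eq_eq_eq_not, Bool.not_true,
        decide_eq_true_eq, decide_eq_false_iff_not] at hb
      have hxy : x.1 ≤ y.1 := by
        rcases hb with h1 | ⟨h1, _⟩
        · exact le_of_lt h1
        · exact not_lt.mp h1
      refine List.pairwise_cons.mpr ⟨?_, h⟩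
      intro z hz
      rcases List.mem_cons.mp hz with rfl | hz'
      · exact hxy
      · exact le_trans hxy (hy z hz')
    · simp only [Bool.or_eq_true, Bool.and_eq_true, Bool.not_eq_eq_eq_not, Bool.not_true,
        decide_eq_true_eq, decide_eq_false_iff_not, not_or, not_and] at hb
      have hyx : y.1 ≤ x.1 := not_lt.mp hb.1
      refine List.pairwise_cons.mpr ⟨?_, ih hys⟩
      intro z hz
      rcases (PySem.List.mem_insertBy _ x z ys).mp hz with rfl | hz'
      · exact hyx
      · exact hy z hz'

theorem pvFoldl_insertBy_pairwise {α : Type} (Q : α → α → Prop) (before : α → α → Bool)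
    (hins : ∀ x ys, ys.Pairwise Q → (PySem.List.insertBy before x ys).Pairwise Q)
    (xs acc : List α) (hacc : acc.Pairwise Q) :
    (xs.foldl (fun acc x => PySem.List.insertBy before x acc) acc).Pairwise Q := by
  induction xs generalizing acc with
  | nil => exact hacc
  | cons x xs ih => exact ih _ (hins x acc hacc)

theorem pvSorted2_fst_pairwise (xs : List (String × String)) :
    ((PySem.List.sorted2 xs (fun p => p.1) (fun p => p.2)).map (fun p => p.1)).Pairwise
      (· ≤ ·) := by
  rw [List.pairwise_map]
  exact pvFoldl_insertBy_pairwise _ _ (fun x ys h => pvInsertBy_pairwise x ys h) xs [] (by simp)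

theorem pvOfList_cons_dup {α : Type} [BEq α] [LawfulBEq α] (c : α) (L : List α) :
    PySem.Set.ofList (c :: c :: L) = PySem.Set.ofList (c :: L) := by
  rw [PySem.Set.ofList_cons, PySem.Set.ofList_cons]
  simp [PySem.Set.discard, List.filter_filter]

-- ofList of a constant block followed by keys avoiding the constant
theorem pvOfList_const_append (xs ys : List Char) (c : Char)
    (h1 : ∀ x ∈ xs, x = c) (h2 : c ∉ ys) :
    PySem.Set.ofList (c :: (xs ++ ys)) = c :: PySem.Set.ofList ys := by
  induction xs with
  | nil =>
    rw [List.nil_append, PySem.Set.ofList_cons]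
    congr 1
    apply List.filter_eq_self.mpr
    intro y hy
    have hmem : y ∈ ys := (PySem.Set.mem_ofList ys y).mp hy
    have hyc : y ≠ c := fun hc => h2 (hc ▸ hmem)
    simp [hyc]
  | cons x xs ih =>
    have hxc : x = c := h1 x List.mem_cons_self
    subst hxc
    rw [List.cons_append, pvOfList_cons_dup]
    exact ih (fun z hz => h1 z (List.mem_cons_of_mem x hz))

theorem pvDropWhile_head_ne {α : Type} (pred : α → Bool) (t : List α) (h0 : α) (dr2 : List α)
    (h : t.dropWhile pred = h0 :: dr2) : pred h0 = false := by
  induction t with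
  | nil => simp at h
  | cons a t ih =>
    rw [List.dropWhile_cons] at h
    split_ifs at h with hp
    · exact ih h
    · injection h with h1 _
      subst h1
      exact (Bool.not_eq_true _).mp hp

-- A's grouped rendering equals B's recursive chunk emitter, by chunk induction
theorem pvA_chunks (n : Nat) (s : List (String × String)) (hn : s.length ≤ n)
    (hpw : (s.map (fun p => pvHeadB p.1)).Pairwise (· ≤ ·)) :
    (PySem.Set.ofList (s.map (fun p => pvHeadB p.1))).Pairwise (· < ·) ∧
    (PySem.Set.ofList (s.map (fun p => pvHeadB p.1))).flatMap
      (fun c => pvHeaderA c :: (s.filter (fun p => pvHeadB p.1 == c)).map pvPutB ++ [""])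
      = pvEmitB s := by
  induction n generalizing s with
  | zero =>
    have : s = [] := List.length_eq_zero_iff.mp (Nat.le_zero.mp hn)
    subst this
    simp [pvEmitB, PySem.Set.ofList_nil]
  | succ n ih =>
    cases s with
    | nil => simp [pvEmitB, PySem.Set.ofList_nil]
    | cons p t =>
      set c := pvHeadB p.1 with hc
      set tw := t.takeWhile (fun q => pvHeadB q.1 == c) with htw_def
      set dr := t.dropWhile (fun q => pvHeadB q.1 == c) with hdr_def
      have htdr : tw ++ dr = t := List.takeWhile_append_dropWhile
      have htw : ∀ q ∈ tw, pvHeadB q.1 = c := by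
        intro q hq
        simpa using List.mem_takeWhile_imp hq
      have hpw' := hpw
      rw [List.map_cons, List.pairwise_cons] at hpw'
      obtain ⟨hple, hpwt⟩ := hpw'
      have hple' : ∀ q ∈ t, c ≤ pvHeadB q.1 := by
        intro q hq
        exact hple _ (List.mem_map_of_mem hq)
      have hpwdr : ((dr.map (fun p => pvHeadB p.1)).Pairwise (· ≤ ·)) := by
        have : t.map (fun p => pvHeadB p.1) = tw.map (fun p => pvHeadB p.1) ++ dr.map (fun p => pvHeadB p.1) := by
          rw [← List.map_append, htdr]
        rw [this] at hpwt
        exact (List.pairwise_append.mp hpwt).2.1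
      have hdr_gt : ∀ q ∈ dr, c < pvHeadB q.1 := by
        cases hd : dr with
        | nil => simp
        | cons h0 dr2 =>
          have hdw : t.dropWhile (fun q => pvHeadB q.1 == c) = h0 :: dr2 := by
            rw [← hdr_def, hd]
          have hne' : pvHeadB h0.1 ≠ c := by
            simpa using pvDropWhile_head_ne _ t h0 dr2 hdw
          have h0t : h0 ∈ t := by
            rw [← htdr, hd]; exact List.mem_append_right _ List.mem_cons_self
          have hc0 : c < pvHeadB h0.1 := lt_of_le_of_ne (hple' h0 h0t) (Ne.symm hne')
          intro q hq
          rcases List.mem_cons.mp hq with rfl | hq'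
          · exact hc0
          · have : pvHeadB h0.1 ≤ pvHeadB q.1 := by
              rw [hd] at hpwdr
              rw [List.map_cons, List.pairwise_cons] at hpwdr
              exact hpwdr.1 _ (List.mem_map_of_mem hq')
            exact lt_of_lt_of_le hc0 this
      have hkeys : PySem.Set.ofList ((p :: t).map (fun p => pvHeadB p.1))
          = c :: PySem.Set.ofList (dr.map (fun p => pvHeadB p.1)) := by
        have hmap : (p :: t).map (fun p => pvHeadB p.1)
            = c :: (tw.map (fun p => pvHeadB p.1) ++ dr.map (fun p => pvHeadB p.1)) := by
          rw [List.map_cons, ← List.map_append, htdr]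
        rw [hmap]
        apply pvOfList_const_append
        · intro x hx
          obtain ⟨q, hq, rfl⟩ := List.mem_map.mp hx
          exact htw q hq
        · intro hcm
          obtain ⟨q, hq, hqc⟩ := List.mem_map.mp hcm
          exact absurd hqc (ne_of_gt (hdr_gt q hq))
      have hlen : dr.length ≤ n := by
        have h1 : dr.length ≤ t.length := by
          rw [hdr_def]; exact List.length_dropWhile_le _ _
        have h2 : t.length ≤ n := by simpa using Nat.le_of_succ_le_succ hn
        exact le_trans h1 h2
      obtain ⟨ihpw, ihflat⟩ := ih dr hlen hpwdr
      constructor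
      · rw [hkeys]
        refine List.pairwise_cons.mpr ⟨?_, ihpw⟩
        intro c' hc'
        have : c' ∈ dr.map (fun p => pvHeadB p.1) :=
          (PySem.Set.mem_ofList _ _).mp hc'
        obtain ⟨q, hq, rfl⟩ := List.mem_map.mp this
        exact hdr_gt q hq
      · rw [hkeys, List.flatMap_cons]
        have hfc : (p :: t).filter (fun q => pvHeadB q.1 == c) = p :: tw := by
          rw [← htdr]
          rw [show (p :: (tw ++ dr)) = [p] ++ tw ++ dr by simp]
          rw [List.filter_append, List.filter_append]
          have e1 : [p].filter (fun q => pvHeadB q.1 == c) = [p] := by simp [hc]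
          have e2 : tw.filter (fun q => pvHeadB q.1 == c) = tw :=
            List.filter_eq_self.mpr (fun q hq => by simp [htw q hq])
          have e3 : dr.filter (fun q => pvHeadB q.1 == c) = [] :=
            List.filter_eq_nil_iff.mpr (fun q hq => by
              simpa using ne_of_gt (hdr_gt q hq))
          rw [e1, e2, e3, List.append_nil]
          simp
        have hrest : (PySem.Set.ofList (dr.map (fun p => pvHeadB p.1))).flatMap
              (fun c' => pvHeaderA c' :: ((p :: t).filter (fun p => pvHeadB p.1 == c')).map pvPutB ++ [""])
            = (PySem.Set.ofList (dr.map (fun p => pvHeadB p.1))).flatMap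
              (fun c' => pvHeaderA c' :: (dr.filter (fun p => pvHeadB p.1 == c')).map pvPutB ++ [""]) := by
          apply List.flatMap_congr
          intro c' hc'
          obtain ⟨q, hq, rfl⟩ := List.mem_map.mp ((PySem.Set.mem_ofList _ _).mp hc')
          have hcq : c < pvHeadB q.1 := hdr_gt q hq
          have hfq : (p :: t).filter (fun r => pvHeadB r.1 == pvHeadB q.1)
              = dr.filter (fun r => pvHeadB r.1 == pvHeadB q.1) := by
            rw [← htdr, show (p :: (tw ++ dr)) = [p] ++ tw ++ dr by simp,
              List.filter_append, List.filter_append]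
            have e1 : [p].filter (fun r => pvHeadB r.1 == pvHeadB q.1) = [] := by
              simp [← hc]
              exact fun hcc => absurd hcc (ne_of_lt hcq)
            have e2 : tw.filter (fun r => pvHeadB r.1 == pvHeadB q.1) = [] :=
              List.filter_eq_nil_iff.mpr (fun r hr => by
                simp [htw r hr]
                exact fun hcc => absurd hcc (ne_of_lt hcq))
            rw [e1, e2]
            simp
          rw [hfq]
        rw [hfc, hrest, ihflat]
        have hemit : pvEmitB (p :: t)
            = (pvHeaderB c :: ((p :: tw).map pvPutB ++ [""])) ++ pvEmitB dr := by
          rw [pvEmitB, ← hc, ← htw_def, ← hdr_def]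
        rw [hemit, pvHeader_eq]
        simp

-- ===== VERDICT (by name: the statement is the Claim_ definition above) =====
theorem generate_java_code_spec : Claim_equal_generate_java_code := by
  unfold Claim_equal_generate_java_code
  intro w _ hne
  unfold Spec_generate_java_code generate_java_code generate_java_code_alt
  simp only [pvHead_eq]
  refine congrArg (PySem.Str.join "\n") ?_
  have hsperm := PySem.List.sorted2_perm w (fun p => p.1) (fun p => p.2) false
  have hpw : ((PySem.List.sorted2 w (fun p => p.1) (fun p => p.2)).map
      (fun p => pvHeadB p.1)).Pairwise (· ≤ ·) := by
    have h1 := pvSorted2_fst_pairwise w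
    rw [List.pairwise_map] at h1 ⊢
    refine h1.imp_of_mem ?_
    intro a b ha hb hab
    exact pvHead_le_of_le _ _ (hne a (hsperm.subset ha)) (hne b (hsperm.subset hb)) hab
  obtain ⟨hkpw, hflat⟩ :=
    pvA_chunks (PySem.List.sorted2 w (fun p => p.1) (fun p => p.2)).length _ le_rfl hpw
  have hgk : ((PySem.List.sorted2 w (fun p => p.1) (fun p => p.2)).foldl
        (fun d p => d.modify (pvHeadB p.1) [] fun l => l ++ [p]) PySem.Dict.empty).keys
      = PySem.Set.ofList ((PySem.List.sorted2 w (fun p => p.1) (fun p => p.2)).map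
          (fun p => pvHeadB p.1)) := by
    have h := PySem.Dict.keys_foldl_modify_key
      (PySem.List.sorted2 w (fun p => p.1) (fun p => p.2))
      (fun p => pvHeadB p.1) [] (fun _ p l => l ++ [p]) PySem.Dict.empty
    simpa [PySem.Dict.keys_empty, PySem.Set.update_nil_left] using h
  have hgd : ∀ c, ((PySem.List.sorted2 w (fun p => p.1) (fun p => p.2)).foldl
        (fun d p => d.modify (pvHeadB p.1) [] fun l => l ++ [p]) PySem.Dict.empty).getD c []
      = (PySem.List.sorted2 w (fun p => p.1) (fun p => p.2)).filter
          (fun p => pvHeadB p.1 == c) := by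
    intro c
    have h1 : (PySem.List.sorted2 w (fun p => p.1) (fun p => p.2)).foldl
        (fun d p => d.modify (pvHeadB p.1) [] fun l => l ++ [p]) PySem.Dict.empty
      = ((PySem.List.sorted2 w (fun p => p.1) (fun p => p.2)).map
          (fun p => (pvHeadB p.1, p))).foldl
          (fun d q => d.modify q.1 [] fun l => l ++ [q.2]) PySem.Dict.empty := by
      rw [List.foldl_map]
    rw [h1, PySem.Dict.getD_foldl_modify_append]
    simp [List.filter_map, Function.comp_def]
  rw [hgk, PySem.List.sorted_eq_self_of_pairwise _ _ (hkpw.imp (fun h => le_of_lt h))]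
  simp only [hgd]
  simp only [PySem.List.foldl_append_singleton_eq_map]
  simp only [List.append_assoc]
  rw [PySem.List.foldl_append_eq_flatMap]
  exact congrArg _ hflat
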